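-- pv_equiv track=rewrite | github.com/tnghia903/yagi-statement | extract_data.py | __clean_row_vcb_2
-- ===== SOURCE A (Python) =====
-- from typing import Callable, Dict, List, Optional
--
-- def __clean_row_vcb_2(raw_rows: List[str]) -> List[List[str]]:
--     cleaned_row = [[] for i in range(len(raw_rows))]
--
--     for i, row in enumerate(raw_rows):
--         for j, item in enumerate(row):
--             if j == 2:
--                 cleaned_row[i].append(item.replace(".", ""))
--             elif j == 3:
--                 cleaned_row[i].append(item.replace("\n", " "))
--             elif j == 0:
--                 continue
--             else:
--                 cleaned_row[i].append(item)
--     return cleaned_row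
-- ===== SOURCE B (Python) =====
-- from typing import List
--
-- def __clean_row_vcb_2(raw_rows: List[str]) -> List[List[str]]:
--     cleaned = []
--     for row in raw_rows:
--         new = list(row)[1:]
--         if len(new) >= 2:
--             new[1] = new[1].replace(".", "")
--         if len(new) >= 3:
--             new[2] = new[2].replace("\n", " ")
--         cleaned.append(new)
--     return cleaned
-- ===== Notes on version B (the rewrite author's own statement) =====
-- stated objective: simpler
-- what changed: Replaced A's per-element index-branching loop over enumerate with a slice-then-patch decomposition: take row[1:] and rewrite only the two affected positions in place.
import Mathlib
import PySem

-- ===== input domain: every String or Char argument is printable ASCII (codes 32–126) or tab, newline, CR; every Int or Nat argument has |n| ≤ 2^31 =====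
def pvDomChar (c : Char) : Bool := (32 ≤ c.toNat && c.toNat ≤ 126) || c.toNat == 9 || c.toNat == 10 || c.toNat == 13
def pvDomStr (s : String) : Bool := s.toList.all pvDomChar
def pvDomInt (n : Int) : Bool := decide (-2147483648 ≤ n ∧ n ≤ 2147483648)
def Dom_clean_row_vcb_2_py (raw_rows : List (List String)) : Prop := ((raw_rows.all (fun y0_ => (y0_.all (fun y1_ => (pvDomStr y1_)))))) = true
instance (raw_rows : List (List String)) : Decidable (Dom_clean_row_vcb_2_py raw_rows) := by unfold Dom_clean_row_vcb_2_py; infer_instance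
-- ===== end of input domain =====

-- B drops row[0] by slicing and patches the two affected positions in place; simpler than A's per-index branching loop.

-- ===== PORT A =====
-- the inner `for j, item in enumerate(row)` body, as a fold step
def cleanStepA (acc : List String) (p : Int × String) : List String :=
  if p.1 == 2 then acc ++ [PySem.Str.replace p.2 "." ""]
  else if p.1 == 3 then acc ++ [PySem.Str.replace p.2 "\n" " "]
  else if p.1 == 0 then acc
  else acc ++ [p.2]

def clean_row_vcb_2_py (raw_rows : List (List String)) : List (List String) :=
  raw_rows.map (fun row => (PySem.List.enumerate row 0).foldl cleanStepA [])

-- ===== PORT B =====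
def cleanRowB (row : List String) : List String :=
  let nw := PySem.List.slice row (some 1) none
  let nw := if nw.length ≥ 2 then nw.modify 1 (fun s => PySem.Str.replace s "." "") else nw
  let nw := if nw.length ≥ 3 then nw.modify 2 (fun s => PySem.Str.replace s "\n" " ") else nw
  nw

def clean_row_vcb_2_py_alt (raw_rows : List (List String)) : List (List String) :=
  raw_rows.map cleanRowB

-- ===== PRECONDITION & SPEC =====
def Spec_clean_row_vcb_2_py (raw_rows : List (List String)) (out : List (List String)) : Prop := out = clean_row_vcb_2_py_alt raw_rows
instance (raw_rows : List (List String)) (out : List (List String)) : Decidable (Spec_clean_row_vcb_2_py raw_rows out) := by unfold Spec_clean_row_vcb_2_py; infer_instance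

-- ===== CLAIM (what is proved, stated in full; the proofs are below) =====
def Claim_equal_clean_row_vcb_2_py : Prop := ∀ (raw_rows : List (List String)), Dom_clean_row_vcb_2_py raw_rows → Spec_clean_row_vcb_2_py raw_rows (clean_row_vcb_2_py raw_rows)

-- ===== LEMMAS AND PROOFS =====

-- past index 3 the loop of A just appends every item unchanged
theorem foldl_cleanStepA_tail (rest : List String) :
    ∀ (j : Int) (acc : List String), 4 ≤ j →
      (PySem.List.enumerate rest j).foldl cleanStepA acc = acc ++ rest := by
  induction rest with
  | nil => intro j acc _; simp [PySem.List.enumerate_nil]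
  | cons x xs ih =>
    intro j acc hj
    have h2 : (j == 2) = false := by simp; omega
    have h3 : (j == 3) = false := by simp; omega
    have h0 : (j == 0) = false := by simp; omega
    simp only [PySem.List.enumerate_cons, List.foldl_cons, cleanStepA, h2, h3, h0,
      Bool.false_eq_true, if_false]
    rw [ih (j + 1) _ (by omega)]
    simp

theorem cleanRow_eq (row : List String) :
    (PySem.List.enumerate row 0).foldl cleanStepA [] = cleanRowB row := by
  match row with
  | [] => simp [PySem.List.enumerate_nil, cleanRowB, PySem.List.slice_from_one]
  | [a] => simp [PySem.List.enumerate_cons, PySem.List.enumerate_nil, cleanStepA, cleanRowB,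
      PySem.List.slice_from_one]
  | [a, b] => simp [PySem.List.enumerate_cons, PySem.List.enumerate_nil, cleanStepA, cleanRowB,
      PySem.List.slice_from_one]
  | [a, b, c] => simp [PySem.List.enumerate_cons, PySem.List.enumerate_nil, cleanStepA, cleanRowB,
      PySem.List.slice_from_one, List.modify]
  | a :: b :: c :: d :: rest =>
    simp only [PySem.List.enumerate_cons, List.foldl_cons, cleanStepA]
    norm_num
    rw [foldl_cleanStepA_tail rest 4 _ (by omega)]
    simp [cleanRowB, PySem.List.slice_from_one, List.modify]

-- ===== VERDICT (by name: the statement is the Claim_ definition above) =====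
theorem clean_row_vcb_2_py_spec : Claim_equal_clean_row_vcb_2_py := by
  intro raw_rows _
  unfold Spec_clean_row_vcb_2_py clean_row_vcb_2_py clean_row_vcb_2_py_alt
  exact List.map_congr_left (fun row _ => cleanRow_eq row)
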